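-- pv_equiv track=rewrite | github.com/pypi-data/pypi-mirror-99 | packages/Rest-OC/rest-oc-0.7.8.tar.gz/rest-oc-0.7.8/RestOC/StrHelper.py | strtr
-- ===== SOURCE A (Python) =====
-- def strtr(text, table):
-- 	"""String Translate
--
-- 	Port of PHP strtr (string translate)
--
-- 	Args:
-- 		text (str): The string to translate
-- 		table (dict): The translation table
--
-- 	Returns:
-- 		str
-- 	"""
-- 	text = str(text)
-- 	buff = []
-- 	i = 0
-- 	n = len(text)
-- 	while i < n:
-- 		for s, r in table.items():
-- 			if text[i:len(s)+i] == s: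
-- 				buff.append(r)
-- 				i += len(s)
-- 				break
-- 		else:
-- 			buff.append(text[i])
-- 			i += 1
--
-- 	return ''.join(buff)
-- ===== SOURCE B (Python) =====
-- def strtr(text, table):
--     """PHP strtr, decomposed as repeated consumption of the remaining suffix:
--     empty search keys are dropped up front, and a helper returns (piece, rest)
--     for the first table entry that prefixes the suffix (or one literal char)."""
--     text = str(text)
--     pairs = [(s, r) for s, r in table.items() if s]
--
--     def step(rest):
--         for s, r in pairs:
--             if rest.startswith(s):
--                 return r, rest[len(s):]
--         return rest[0], rest[1:]
--
--     out = []
--     rest = text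
--     while rest:
--         piece, rest = step(rest)
--         out.append(piece)
--     return ''.join(out)
-- ===== Notes on version B (the rewrite author's own statement) =====
-- stated objective: alternative
-- what changed: B first drops empty search keys in one comprehension, then consumes the text as a shrinking suffix through a step helper that returns (piece, remaining suffix) for the first key prefixing the suffix, instead of A's index-driven while-loop that re-slices the text for every table entry at every position. Pre_ excludes tables containing an empty key with nonempty text, where A's while-loop can fail to advance and diverge (on such tables A only returns when an earlier entry consumes a character at every position).
-- outside the precondition, e.g. on strtr('aa', {'a': 'x', '': 'y'}): A returns 'xx', B returns 'xx'
import Mathlib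
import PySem

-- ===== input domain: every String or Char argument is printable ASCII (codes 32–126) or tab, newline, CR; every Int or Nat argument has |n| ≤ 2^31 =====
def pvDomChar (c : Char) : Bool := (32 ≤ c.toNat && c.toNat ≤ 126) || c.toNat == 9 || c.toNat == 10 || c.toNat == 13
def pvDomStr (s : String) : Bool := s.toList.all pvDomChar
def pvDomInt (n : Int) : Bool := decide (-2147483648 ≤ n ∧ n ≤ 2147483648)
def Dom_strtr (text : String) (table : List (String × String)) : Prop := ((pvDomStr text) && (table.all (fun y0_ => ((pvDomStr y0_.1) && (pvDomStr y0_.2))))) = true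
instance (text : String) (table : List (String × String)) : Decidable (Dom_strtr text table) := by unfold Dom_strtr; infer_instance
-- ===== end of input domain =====

-- B drops empty search keys up front and consumes the text as a shrinking suffix via a
-- step helper returning (piece, rest); same return value as A on Pre_ (objective: alternative).

-- ===== PORT A =====
-- inner for-loop over table.items(): first entry whose key equals text[i:len(s)+i]
def strtrFind (cs : List Char) (i : Nat) (items : List (String × String)) :
    Option (String × String) :=
  items.find? (fun p =>
    PySem.List.slice cs (some (i : Int)) (some ((p.1.toList.length : Int) + (i : Int))) == p.1.toList)

-- while-loop of A; fuel bounds the iterations (A loops forever on an empty key, outside Pre_)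
def strtrLoop (items : List (String × String)) (cs : List Char) :
    Nat → Nat → List String → List String
  | 0, _, buff => buff
  | fuel + 1, i, buff =>
    if h : i < cs.length then
      match strtrFind cs i items with
      | some (s, r) => strtrLoop items cs fuel (i + s.toList.length) (buff ++ [r])
      | none => strtrLoop items cs fuel (i + 1) (buff ++ [cs[i].toString])
    else buff

def strtr (text : String) (table : List (String × String)) : String :=
  PySem.Str.join "" (strtrLoop (PySem.Dict.ofList table).items text.toList text.toList.length 0 [])

-- ===== PORT B =====
-- step(rest): first pair whose key prefixes the suffix, else one literal character.
-- rest is nonempty at every call site (the while-loop guard), so headD/tail are exact there.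
def strtrStep : List (String × String) → List Char → String × List Char
  | [], rest => ((rest.headD ' ').toString, rest.tail)
  | (s, r) :: ps, rest =>
    if s.toList.isPrefixOf rest then (r, rest.drop s.toList.length)
    else strtrStep ps rest

-- while rest: piece, rest = step(rest); out.append(piece).  All kept keys are nonempty,
-- so each step consumes at least one character and fuel = len(text) iterations suffice.
def strtrGoB (pairs : List (String × String)) :
    Nat → List Char → List String → List String
  | 0, _, out => out
  | _ + 1, [], out => out
  | fuel + 1, c :: rest, out =>
    match strtrStep pairs (c :: rest) with
    | (piece, rest') => strtrGoB pairs fuel rest' (out ++ [piece])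

def strtr_alt (text : String) (table : List (String × String)) : String :=
  PySem.Str.join ""
    (strtrGoB ((PySem.Dict.ofList table).items.filter (fun p => !(p.1 == "")))
      text.toList.length text.toList [])

-- ===== PRECONDITION & SPEC =====
-- Pre_ excludes tables containing an empty key together with nonempty text: there A's
-- while-loop can fail to advance (text[i:i] == '' always matches) and A diverges.
def Pre_strtr (text : String) (table : List (String × String)) : Prop :=
  text = "" ∨ ∀ p ∈ table, p.1 ≠ ""
instance (text : String) (table : List (String × String)) : Decidable (Pre_strtr text table) := by
  unfold Pre_strtr; infer_instance

def pvWitness_strtr : String × (List (String × String)) := ("abcab", [("ab", "X"), ("c", "YZ")])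

def Spec_strtr (text : String) (table : List (String × String)) (out : String) : Prop := out = strtr_alt text table
instance (text : String) (table : List (String × String)) (out : String) : Decidable (Spec_strtr text table out) := by unfold Spec_strtr; infer_instance

-- ===== CLAIM (what is proved, stated in full; the proofs are below) =====
def Claim_equal_strtr : Prop := ∀ (text : String) (table : List (String × String)), Dom_strtr text table → Pre_strtr text table → Spec_strtr text table (strtr text table)

-- ===== LEMMAS AND PROOFS =====

-- A's slice test equals B's prefix test
lemma find_pred_eq (cs : List Char) (i : Nat) (p : String × String) :
    (PySem.List.slice cs (some (i : Int)) (some ((p.1.toList.length : Int) + (i : Int)))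
        == p.1.toList)
      = p.1.toList.isPrefixOf (cs.drop i) := by
  rw [add_comm ((p.1.toList.length : Int)) (i : Int), PySem.List.slice_natCast_add,
    Bool.eq_iff_iff]
  simp only [beq_iff_eq, List.isPrefixOf_iff_prefix, List.prefix_iff_eq_take]
  exact eq_comm

-- PySem.Set.update from the empty set is ofList
lemma set_update_nil (l : List String) :
    PySem.Set.update ([] : List String) l = PySem.Set.ofList l := by
  have h := PySem.Set.ofList_append ([] : List String) l
  simpa [PySem.Set.ofList_nil] using h.symm

-- keys appearing in (Dict.ofList table).items come from table
lemma key_mem_of_mem_items (table : List (String × String))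
    (p : String × String) (hp : p ∈ (PySem.Dict.ofList table).items) :
    p.1 ∈ table.map Prod.fst := by
  have h1 : p.1 ∈ (PySem.Dict.ofList table).keys :=
    PySem.Dict.mem_keys_of_mem_items _ hp
  have h2 : (PySem.Dict.ofList table).keys = PySem.Set.ofList (table.map Prod.fst) := by
    have : (PySem.Dict.ofList table) =
        table.foldl (fun d q => d.insert q.1 q.2) PySem.Dict.empty := rfl
    rw [this]
    have := PySem.Dict.keys_foldl_insert_key (l := table) (key := Prod.fst)
      (f := fun d q => q.2) (d := PySem.Dict.empty)
    rw [this]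
    simp only [PySem.Dict.keys_empty]
    exact set_update_nil _
  rw [h2] at h1
  exact (PySem.Set.mem_ofList _ _).mp h1

-- the step helper on the suffix agrees with A's inner find
lemma step_of_find_some (cs : List Char) (i : Nat) :
    ∀ (items : List (String × String)) (s r : String),
      strtrFind cs i items = some (s, r) →
      strtrStep items (cs.drop i) = (r, cs.drop (i + s.toList.length)) := by
  intro items
  induction items with
  | nil => intro s r h; simp [strtrFind] at h
  | cons p ps ih =>
    intro s r h
    rw [strtrFind, List.find?] at h
    rw [strtrStep]
    by_cases hp : (PySem.List.slice cs (some (i : Int))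
        (some ((p.1.toList.length : Int) + (i : Int))) == p.1.toList) = true
    · rw [hp] at h
      have hpre : p.1.toList.isPrefixOf (cs.drop i) = true := by
        rw [← find_pred_eq]; exact hp
      obtain ⟨h1, h2⟩ := Prod.mk.injEq .. ▸ (Option.some.injEq .. ▸ h : (p.1, p.2) = (s, r))
      rw [if_pos hpre, List.drop_drop, h1, h2]
    · have hp' : (PySem.List.slice cs (some (i : Int))
          (some ((p.1.toList.length : Int) + (i : Int))) == p.1.toList) = false :=
        Bool.eq_false_iff.mpr hp
      rw [hp'] at h
      have hpre : p.1.toList.isPrefixOf (cs.drop i) = false := by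
        rw [← find_pred_eq]; exact hp'
      rw [if_neg (by simp [hpre])]
      exact ih s r h
  
lemma step_of_find_none (cs : List Char) (i : Nat) (hi : i < cs.length) :
    ∀ (items : List (String × String)),
      strtrFind cs i items = none →
      strtrStep items (cs.drop i) = (cs[i].toString, cs.drop (i + 1)) := by
  have hdrop : cs.drop i = cs[i] :: cs.drop (i + 1) := List.drop_eq_getElem_cons hi
  intro items
  induction items with
  | nil =>
    intro _
    rw [strtrStep, hdrop]
    rfl
  | cons p ps ih =>
    intro h
    rw [strtrFind, List.find?] at h
    cases hp : (PySem.List.slice cs (some (i : Int))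
        (some ((p.1.toList.length : Int) + (i : Int))) == p.1.toList) with
    | true => rw [hp] at h; exact absurd h (by simp)
    | false =>
      rw [hp] at h
      have hpre : p.1.toList.isPrefixOf (cs.drop i) = false := by
        rw [← find_pred_eq]; exact hp
      rw [strtrStep, if_neg (by simp [hpre])]
      exact ih h

-- the two loops agree: A at index i equals B on the suffix from i
lemma loop_eq (items : List (String × String)) (cs : List Char) :
    ∀ (fuel i : Nat) (buff : List String),
      strtrLoop items cs fuel i buff = strtrGoB items fuel (cs.drop i) buff := by
  intro fuel
  induction fuel with
  | zero => intro i buff; rfl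
  | succ f ih =>
    intro i buff
    by_cases hi : i < cs.length
    · have hdrop : cs.drop i = cs[i] :: cs.drop (i + 1) := List.drop_eq_getElem_cons hi
      rw [strtrLoop]
      simp only [hi, dif_pos]
      cases hfind : strtrFind cs i items with
      | some sr =>
        have hstep := step_of_find_some cs i items sr.1 sr.2 (by rw [hfind])
        rw [hdrop, strtrGoB, ← hdrop, hstep]
        exact ih _ _
      | none =>
        have hstep := step_of_find_none cs i hi items hfind
        rw [hdrop, strtrGoB, ← hdrop, hstep]
        exact ih _ _
    · have hdrop : cs.drop i = [] := List.drop_eq_nil_of_le (Nat.le_of_not_lt hi)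
      rw [strtrLoop, hdrop, strtrGoB]
      simp [hi]

-- ===== VERDICT (by name: the statement is the Claim_ definition above) =====
theorem strtr_spec : Claim_equal_strtr := by
  intro text table _ hpre
  unfold Spec_strtr strtr strtr_alt
  rcases hpre with hempty | hkeys
  · subst hempty; rfl
  · have hfilter : (PySem.Dict.ofList table).items.filter (fun p => !(p.1 == ""))
        = (PySem.Dict.ofList table).items := by
      apply List.filter_eq_self.mpr
      intro p hp
      have := key_mem_of_mem_items table p hp
      obtain ⟨q, hq, hq1⟩ := List.mem_map.mp this
      simp [hq1 ▸ hkeys q hq]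
    rw [hfilter]
    have h0 := loop_eq (PySem.Dict.ofList table).items text.toList
      text.toList.length 0 []
    rw [List.drop_zero] at h0
    rw [h0]
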